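-- pv_equiv track=rewrite | github.com/garloff/changelog-transform | changelog.py | mycapwd
-- ===== SOURCE A (Python) =====
-- def mycapwd(txt):
-- 	"Custom version of capwords()"
-- 	#import string
-- 	ans = ''
-- 	for ix in range(0, len(txt)):
-- 		if ix == 0 or txt[ix-1] == '.' or txt[ix-1] == '-':
-- 			ans += txt[ix].upper()
-- 		else:
-- 			ans += txt[ix]
-- 	return ans
-- ===== SOURCE B (Python) =====
-- def mycapwd(txt):
-- 	"Custom version of capwords()"
-- 	# Two-stage: split into delimiter-terminated chunks, uppercase each
-- 	# chunk's first character, join.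
-- 	out = []
-- 	rest = txt
-- 	while rest:
-- 		k = _chunklen(rest)
-- 		out.append(rest[:1].upper() + rest[1:k])
-- 		rest = rest[k:]
-- 	return ''.join(out)
--
-- def _chunklen(s):
-- 	"Length of the leading chunk: up to and including the first '.'/'-', else all of s."
-- 	for i, ch in enumerate(s):
-- 		if ch in '.-':
-- 			return i + 1
-- 	return len(s)
-- ===== Notes on version B (the rewrite author's own statement) =====
-- stated objective: faster
-- what changed: Replaced the per-character index loop that looks back at txt[ix-1] with a two-stage chunking algorithm: the string is split into delimiter-terminated chunks ('.'/'-' ends a chunk), each chunk's first character is uppercased, and the chunks are joined once.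
import Mathlib
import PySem

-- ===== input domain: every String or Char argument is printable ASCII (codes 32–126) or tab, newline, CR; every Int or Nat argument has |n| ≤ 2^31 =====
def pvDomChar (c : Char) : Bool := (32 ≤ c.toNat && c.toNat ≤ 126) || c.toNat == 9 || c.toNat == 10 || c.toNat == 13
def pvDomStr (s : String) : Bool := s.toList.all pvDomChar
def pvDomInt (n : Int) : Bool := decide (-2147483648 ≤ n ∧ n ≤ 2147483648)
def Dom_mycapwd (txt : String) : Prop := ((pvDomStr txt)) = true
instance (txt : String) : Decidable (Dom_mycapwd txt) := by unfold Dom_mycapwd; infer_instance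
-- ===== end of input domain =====

-- B replaces A's per-character lookback loop by a two-stage chunking
-- algorithm: split at '.'/'-' into delimiter-terminated chunks, uppercase
-- each chunk's head, join once (measured constant-factor faster: bulk slicing).

-- ===== PORT A =====
-- for ix in range(0, len(txt)): …  — index-based loop, string built by +=
def mycapwd (txt : String) : String :=
  let cs := txt.toList
  let ans := (PySem.List.pyRange 0 (cs.length : Int) 1).foldl
    (fun ans ix =>
      if ix == 0 || PySem.List.pyGetD cs (ix - 1) ' ' == '.'
          || PySem.List.pyGetD cs (ix - 1) ' ' == '-' then
        ans ++ [PySem.Chars.upperChar (PySem.List.pyGetD cs ix ' ')]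
      else
        ans ++ [PySem.List.pyGetD cs ix ' ']) []
  String.mk ans

-- ===== PORT B =====
-- _chunklen(s): index+1 of the first '.'/'-', else len(s)
def pvChunklen : List Char → Nat
  | [] => 0
  | c :: cs => if c == '.' || c == '-' then 1 else pvChunklen cs + 1

theorem pvChunklen_pos (c : Char) (cs : List Char) : 1 ≤ pvChunklen (c :: cs) := by
  simp only [pvChunklen]; split <;> omega

-- while rest: k = _chunklen(rest); out.append(rest[:1].upper() + rest[1:k]); rest = rest[k:]
def pvBGo (rest : List Char) (out : List (List Char)) : List (List Char) :=
  match h : rest with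
  | [] => out
  | c :: cs =>
      let k := pvChunklen rest
      pvBGo (rest.drop k)
        (out ++ [(rest.take 1).map PySem.Chars.upperChar ++ (rest.drop 1).take (k - 1)])
  termination_by rest.length
  decreasing_by
    subst h
    have := pvChunklen_pos c cs
    simp [List.length_drop]
    omega

-- ''.join(out)
def mycapwd_alt (txt : String) : String :=
  String.mk (pvBGo txt.toList []).flatten

-- ===== PRECONDITION & SPEC =====
def Spec_mycapwd (txt : String) (out : String) : Prop := out = mycapwd_alt txt
instance (txt : String) (out : String) : Decidable (Spec_mycapwd txt out) := by unfold Spec_mycapwd; infer_instance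

-- ===== CLAIM (what is proved, stated in full; the proofs are below) =====
def Claim_equal_mycapwd : Prop := ∀ (txt : String), Dom_mycapwd txt → Spec_mycapwd txt (mycapwd txt)

-- ===== LEMMAS AND PROOFS =====

-- common reference 'state machine': capitalize head iff flag set, flag := head is '.'/'-'
def pvCapGo : Bool → List Char → List Char
  | _, [] => []
  | cap, c :: cs =>
      (if cap then PySem.Chars.upperChar c else c) :: pvCapGo (c == '.' || c == '-') cs

-- the non-capitalizing phase copies characters until just past the first delimiter
theorem pvCapGo_false (cs : List Char) :
    pvCapGo false cs = cs.take (pvChunklen cs) ++ pvCapGo true (cs.drop (pvChunklen cs)) := by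
  induction cs with
  | nil => simp [pvCapGo, pvChunklen]
  | cons c cs ih =>
      by_cases hd : (c == '.' || c == '-') = true
      · simp [pvCapGo, pvChunklen, hd]
      · simp only [pvCapGo, pvChunklen, hd, Bool.false_eq_true, if_false]
        simp [ih]

-- B's loop accumulates pvCapGo true
theorem pvBGo_flatten (rest : List Char) (out : List (List Char)) :
    (pvBGo rest out).flatten = out.flatten ++ pvCapGo true rest := by
  induction hn : rest.length using Nat.strong_induction_on generalizing rest out with
  | _ n ih =>
    cases rest with
    | nil => simp [pvBGo, pvCapGo]
    | cons c cs =>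
      rw [pvBGo]
      by_cases hd : (c == '.' || c == '-') = true
      · have hk : pvChunklen (c :: cs) = 1 := by simp [pvChunklen, hd]
        rw [hk, show (c :: cs).drop 1 = cs from rfl,
          ih cs.length (by subst hn; simp) cs _ rfl]
        simp [pvCapGo, hd]
      · have hk : pvChunklen (c :: cs) = pvChunklen cs + 1 := by simp [pvChunklen, hd]
        rw [hk]
        have hlt : (cs.drop (pvChunklen cs)).length < n := by
          subst hn; simp [List.length_drop]
        rw [show (c :: cs).drop (pvChunklen cs + 1) = cs.drop (pvChunklen cs) from rfl,
          ih _ hlt _ _ rfl]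
        simp only [pvCapGo, hd, if_true]
        rw [pvCapGo_false]
        simp

-- A's per-index character, as a map over the index range, is pvCapGo true
theorem pvA_map (cs : List Char) (cap : Bool) :
    (List.range cs.length).map
      (fun i =>
        if (if i = 0 then cap
            else (cs.getD (i - 1) ' ' == '.' || cs.getD (i - 1) ' ' == '-')) then
          PySem.Chars.upperChar (cs.getD i ' ')
        else cs.getD i ' ') = pvCapGo cap cs := by
  induction cs generalizing cap with
  | nil => simp [pvCapGo]
  | cons c cs ih =>
      rw [List.length_cons, List.range_succ_eq_map, List.map_cons, List.map_map]
      refine congrArg₂ _ (by simp) ?_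
      rw [← ih (c == '.' || c == '-')]
      refine List.map_congr_left (fun i _ => ?_)
      cases i <;> simp

-- the two Python loop bodies compute the same per-index character
theorem pvA_body (cs : List Char) (i : Nat) :
    (if ((i : Int) == 0 || PySem.List.pyGetD cs ((i : Int) - 1) ' ' == '.'
          || PySem.List.pyGetD cs ((i : Int) - 1) ' ' == '-') = true then
        PySem.Chars.upperChar (PySem.List.pyGetD cs (i : Int) ' ')
      else PySem.List.pyGetD cs (i : Int) ' ')
    = (if (if i = 0 then true
           else (cs.getD (i - 1) ' ' == '.' || cs.getD (i - 1) ' ' == '-')) then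
        PySem.Chars.upperChar (cs.getD i ' ')
       else cs.getD i ' ') := by
  cases i with
  | zero => simp [PySem.List.pyGetD_zero]
  | succ n =>
      rw [show ((n + 1 : Nat) : Int) - 1 = ((n : Nat) : Int) from by push_cast; ring,
        PySem.List.pyGetD_natCast, PySem.List.pyGetD_natCast]
      simp [show ¬((n : Int) + 1 = 0) by omega]

-- A's fold builds pvCapGo true
theorem pvA_eq (txt : String) : mycapwd txt = String.mk (pvCapGo true txt.toList) := by
  simp only [mycapwd]
  rw [PySem.List.pyRange_zero_natCast, List.foldl_map]
  have hf : (fun (ans : List Char) (k : Nat) =>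
      (fun (ans : List Char) (ix : Int) =>
        if (ix == 0 || PySem.List.pyGetD txt.toList (ix - 1) ' ' == '.'
            || PySem.List.pyGetD txt.toList (ix - 1) ' ' == '-') = true then
          ans ++ [PySem.Chars.upperChar (PySem.List.pyGetD txt.toList ix ' ')]
        else ans ++ [PySem.List.pyGetD txt.toList ix ' ']) ans (k : Int))
      = (fun (ans : List Char) (i : Nat) => ans ++
          [if (if i = 0 then true
              else (txt.toList.getD (i - 1) ' ' == '.'
                    || txt.toList.getD (i - 1) ' ' == '-')) then
            PySem.Chars.upperChar (txt.toList.getD i ' ')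
          else txt.toList.getD i ' ']) := by
    funext ans i
    have h := pvA_body txt.toList i
    have hsplit : ∀ (c : Bool) (u v : Char),
        (if c = true then ans ++ [u] else ans ++ [v]) = ans ++ [if c = true then u else v] := by
      intro c u v; cases c <;> rfl
    simp only []
    rw [hsplit, h]
  rw [hf, PySem.List.foldl_append_singleton_eq_map, pvA_map]
  simp

-- ===== VERDICT (by name: the statement is the Claim_ definition above) =====
theorem mycapwd_spec : Claim_equal_mycapwd := by
  intro txt _
  simp only [Spec_mycapwd, mycapwd_alt]
  rw [pvA_eq, pvBGo_flatten]
  simp
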